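-- pv_equiv track=rewrite | github.com/vincent-vega/adventofcode | 2017/day_15/15.py | _nxt2
-- ===== SOURCE A (Python) =====
-- from typing import Generator
--
-- def _nxt2(start: tuple[int, int], factor: tuple[int, int], cnt: int) -> Generator[tuple, None, None]:
--     curA, curB = start
--     factorA, factorB = factor
--     for _ in range(cnt):
--         while True:
--             curA = (curA * factorA) % 2147483647
--             if curA % 4 == 0:
--                 break
--         while True:
--             curB = (curB * factorB) % 2147483647
--             if curB % 8 == 0:
--                 break
--         yield curA, curB
-- ===== SOURCE B (Python) =====
-- from typing import Generator
--
-- M = 2147483647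
--
--
-- def _filtered(s: int, f: int, d: int, n: int) -> list:
--     # Track the running power p = f**k mod M of the factor; the k-th raw LCG
--     # value is derived from it as s*p % M.  Collect the first n raw values
--     # divisible by d.
--     out, p = [], 1
--     for _ in range(n):
--         p = p * f % M
--         while s * p % M % d:
--             p = p * f % M
--         out.append(s * p % M)
--     return out
--
--
-- def _nxt2(start: tuple[int, int], factor: tuple[int, int], cnt: int) -> Generator[tuple, None, None]:
--     yield from zip(_filtered(start[0], factor[0], 4, cnt), _filtered(start[1], factor[1], 8, cnt))
-- ===== Notes on version B (the rewrite author's own statement) =====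
-- stated objective: alternative
-- what changed: A iterates the raw LCG value itself (cur = cur*factor % M) in one interleaved loop with two nested searches; B instead maintains the running power p = factor^k mod M and derives each raw value as start*p % M, builds the two filtered sequences independently, and zips them.
import Mathlib
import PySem

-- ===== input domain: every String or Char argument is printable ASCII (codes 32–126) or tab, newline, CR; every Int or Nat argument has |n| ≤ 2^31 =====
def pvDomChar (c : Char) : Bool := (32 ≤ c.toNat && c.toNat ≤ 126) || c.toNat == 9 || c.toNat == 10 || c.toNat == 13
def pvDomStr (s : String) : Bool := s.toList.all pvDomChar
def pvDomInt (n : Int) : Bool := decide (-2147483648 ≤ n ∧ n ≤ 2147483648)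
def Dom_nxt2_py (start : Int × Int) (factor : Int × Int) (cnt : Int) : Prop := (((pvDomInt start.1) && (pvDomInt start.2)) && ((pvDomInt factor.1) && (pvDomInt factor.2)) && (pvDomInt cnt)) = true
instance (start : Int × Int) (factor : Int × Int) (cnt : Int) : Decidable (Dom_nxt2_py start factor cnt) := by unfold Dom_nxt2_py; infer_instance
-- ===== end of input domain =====

-- B maintains the running power p = factor^k mod M and derives each raw value as
-- start*p % M, building the two filtered sequences independently and zipping them
-- (objective: alternative; not faster).
-- Both Pythons loop forever when the LCG orbit never meets a multiple of 4 (resp. 8);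
-- the ports make exactly that search total with the SAME fuel guard (pvFuel) on both
-- sides, so nothing is claimed beyond what both Pythons compute.

-- ===== PORT A =====
def pvFuel : Nat := 100000000

-- the inner `while True` of A: advance the LCG value until it is divisible by d
-- (fuel guard for totality only; on exhaustion it returns the value reached)
def pvSpin (f d : Int) : Nat → Int → Int
  | 0, cur => cur
  | fuel+1, cur =>
    let c := PySem.Int.mod (cur * f) 2147483647
    if PySem.Int.mod c d = 0 then c else pvSpin f d fuel c

-- A's `for _ in range(cnt)` loop: interleaved search for the A-value then the B-value
def pvGoA (fA fB : Int) : Nat → Int → Int → List (Int × Int)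
  | 0, _, _ => []
  | n+1, cA, cB =>
    let a := pvSpin fA 4 pvFuel cA
    let b := pvSpin fB 8 pvFuel cB
    (a, b) :: pvGoA fA fB n a b

def nxt2_py (start : Int × Int) (factor : Int × Int) (cnt : Int) : List (Int × Int) :=
  pvGoA factor.1 factor.2 cnt.toNat start.1 start.2

-- ===== PORT B =====
-- B's do-while over the power p: advance p = p*f % M until the derived value
-- s*p % M is divisible by d (same fuel guard as A's search; on exhaustion it
-- returns the power reached)
def pvAdvance (s f d : Int) : Nat → Int → Int
  | 0, p => p
  | fuel+1, p =>
    let p' := PySem.Int.mod (p * f) 2147483647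
    if PySem.Int.mod (PySem.Int.mod (s * p') 2147483647) d = 0 then p'
    else pvAdvance s f d fuel p'

-- B's `_filtered`: the first n filtered derived values, threading the power p
def pvPicksB (s f d : Int) : Nat → Int → List Int
  | 0, _ => []
  | n+1, p =>
    let p' := pvAdvance s f d pvFuel p
    PySem.Int.mod (s * p') 2147483647 :: pvPicksB s f d n p'

def nxt2_py_alt (start : Int × Int) (factor : Int × Int) (cnt : Int) : List (Int × Int) :=
  (pvPicksB start.1 factor.1 4 cnt.toNat 1).zip (pvPicksB start.2 factor.2 8 cnt.toNat 1)

-- ===== PRECONDITION & SPEC =====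
def Spec_nxt2_py (start : Int × Int) (factor : Int × Int) (cnt : Int) (out : List (Int × Int)) : Prop := out = nxt2_py_alt start factor cnt
instance (start : Int × Int) (factor : Int × Int) (cnt : Int) (out : List (Int × Int)) : Decidable (Spec_nxt2_py start factor cnt out) := by unfold Spec_nxt2_py; infer_instance

-- ===== CLAIM =====
def Claim_equal_nxt2_py : Prop := ∀ (start : Int × Int) (factor : Int × Int) (cnt : Int), Dom_nxt2_py start factor cnt → Spec_nxt2_py start factor cnt (nxt2_py start factor cnt)

-- ===== LEMMAS AND PROOFS =====

-- one-step unfoldings of the two inner searches (cited by the inductions below)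
theorem pvSpin_succ (f d : Int) (fuel : Nat) (cur : Int) :
    pvSpin f d (fuel+1) cur =
      if PySem.Int.mod (PySem.Int.mod (cur * f) 2147483647) d = 0
      then PySem.Int.mod (cur * f) 2147483647
      else pvSpin f d fuel (PySem.Int.mod (cur * f) 2147483647) := rfl

theorem pvAdvance_succ (s f d : Int) (fuel : Nat) (p : Int) :
    pvAdvance s f d (fuel+1) p =
      if PySem.Int.mod (PySem.Int.mod (s * PySem.Int.mod (p * f) 2147483647) 2147483647) d = 0
      then PySem.Int.mod (p * f) 2147483647
      else pvAdvance s f d fuel (PySem.Int.mod (p * f) 2147483647) := rfl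

-- pulling an inner reduction out: (s * ((p*f) % M)) % M = (s*p*f) % M
theorem pvAbsorb (s p f : Int) :
    (s * ((p * f) % 2147483647)) % 2147483647 = (s * p * f) % 2147483647 := by
  rw [Int.mul_emod, Int.emod_emod_of_dvd _ dvd_rfl, ← Int.mul_emod, mul_assoc]

-- one LCG step: A's new value is exactly B's new derived value
theorem pvStep_eq (s f : Int) (p cur : Int)
    (h : cur % 2147483647 = (s * p) % 2147483647) :
    PySem.Int.mod (cur * f) 2147483647 =
      PySem.Int.mod (s * PySem.Int.mod (p * f) 2147483647) 2147483647 := by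
  rw [PySem.Int.mod_eq_emod_of_pos (by norm_num : (0:Int) < 2147483647),
    PySem.Int.mod_eq_emod_of_pos (by norm_num : (0:Int) < 2147483647),
    PySem.Int.mod_eq_emod_of_pos (by norm_num : (0:Int) < 2147483647),
    pvAbsorb, Int.mul_emod, h, ← Int.mul_emod]

-- A's search from a state that is exactly B's derived value returns exactly the
-- value derived from the power B's search finds (also on fuel exhaustion)
theorem pvSpin_exact (s f d : Int) :
    ∀ (fuel : Nat) (p cur : Int), cur = PySem.Int.mod (s * p) 2147483647 →
      pvSpin f d fuel cur = PySem.Int.mod (s * pvAdvance s f d fuel p) 2147483647 := by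
  intro fuel
  induction fuel with
  | zero => intro p cur h; exact h
  | succ m ih =>
    intro p cur h
    have hc := pvStep_eq s f p cur (by
      rw [h, PySem.Int.mod_eq_emod_of_pos (by norm_num : (0:Int) < 2147483647)]
      exact Int.emod_emod_of_dvd _ dvd_rfl)
    rw [pvSpin_succ, pvAdvance_succ, hc]
    split
    · rfl
    · exact ih _ _ rfl

-- the same with only a congruent (possibly unreduced) start value, as on the
-- very first call where cur is the raw Python argument
theorem pvSpin_eq_adv (s f d : Int) (fuel : Nat) (p cur : Int)
    (h : cur % 2147483647 = (s * p) % 2147483647) :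
    pvSpin f d (fuel+1) cur = PySem.Int.mod (s * pvAdvance s f d (fuel+1) p) 2147483647 := by
  have hc := pvStep_eq s f p cur h
  rw [pvSpin_succ, pvAdvance_succ, hc]
  split
  · rfl
  · exact pvSpin_exact s f d fuel _ _ rfl

-- the found value is already reduced, so the invariant carries to the next round
theorem pvRed (s p : Int) :
    (PySem.Int.mod (s * p) 2147483647) % 2147483647 = (s * p) % 2147483647 := by
  rw [PySem.Int.mod_eq_emod_of_pos (by norm_num : (0:Int) < 2147483647)]
  exact Int.emod_emod_of_dvd _ dvd_rfl

-- A's interleaved loop is the zip of B's two independent filtered sequences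
theorem pvGoA_eq_zip (s1 s2 fA fB : Int) (n : Nat) :
    ∀ (pA pB cA cB : Int),
      cA % 2147483647 = (s1 * pA) % 2147483647 →
      cB % 2147483647 = (s2 * pB) % 2147483647 →
      pvGoA fA fB n cA cB = (pvPicksB s1 fA 4 n pA).zip (pvPicksB s2 fB 8 n pB) := by
  induction n with
  | zero => intro _ _ _ _ _ _; rfl
  | succ m ih =>
    intro pA pB cA cB hA hB
    have hFuel : pvFuel = 99999999 + 1 := by norm_num [pvFuel]
    simp only [pvGoA, pvPicksB, List.zip_cons_cons, hFuel]
    rw [pvSpin_eq_adv s1 fA 4 _ pA cA hA, pvSpin_eq_adv s2 fB 8 _ pB cB hB, ← hFuel,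
      ih _ _ _ _ (pvRed s1 _) (pvRed s2 _)]

-- ===== VERDICT =====
theorem nxt2_py_spec : Claim_equal_nxt2_py := by
  intro start factor cnt _
  show nxt2_py start factor cnt = nxt2_py_alt start factor cnt
  simp only [nxt2_py, nxt2_py_alt]
  exact pvGoA_eq_zip _ _ _ _ _ 1 1 _ _ (by simp) (by simp)
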